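-- pv_equiv track=rewrite | github.com/playerxq/ABKS-demo | OD_CKS/OD_CKS_DABE.py | evap
-- ===== SOURCE A (Python) =====
-- def evap(coeffs, root_list):
--     '''evaluate polynomial for debug'''
--     l = len(root_list)
--     col = len(coeffs)
--     if l != col - 1:
--         return -1
--     sum_r = 0
--     for i in root_list:
--         summ = 0
--         for j in range(l, -1, -1):
--             summ *= i
--             summ += coeffs[str(j)]
--         sum_r += summ
--     return sum_r
-- ===== SOURCE B (Python) =====
-- def evap(coeffs, root_list):
--     '''evaluate polynomial for debug'''
--     l = len(root_list)
--     if l != len(coeffs) - 1: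
--         return -1
--     total = 0
--     pw = [1] * l
--     for j in range(l + 1):
--         total += coeffs[str(j)] * sum(pw)
--         pw = [p * i for p, i in zip(pw, root_list)]
--     return total
-- ===== Notes on version B (the rewrite author's own statement) =====
-- stated objective: alternative
-- what changed: Swaps the summation order: instead of Horner-evaluating the polynomial at each root and adding the results, B iterates over exponents j, maintaining the vector of j-th powers of all roots by elementwise multiplication, and accumulates coeffs[str(j)] times the j-th power sum; correct because the double sum over roots and exponents commutes.
-- outside the precondition, e.g. on evap({'': 9}, []): A returns 0, B raises KeyError
import Mathlib
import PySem

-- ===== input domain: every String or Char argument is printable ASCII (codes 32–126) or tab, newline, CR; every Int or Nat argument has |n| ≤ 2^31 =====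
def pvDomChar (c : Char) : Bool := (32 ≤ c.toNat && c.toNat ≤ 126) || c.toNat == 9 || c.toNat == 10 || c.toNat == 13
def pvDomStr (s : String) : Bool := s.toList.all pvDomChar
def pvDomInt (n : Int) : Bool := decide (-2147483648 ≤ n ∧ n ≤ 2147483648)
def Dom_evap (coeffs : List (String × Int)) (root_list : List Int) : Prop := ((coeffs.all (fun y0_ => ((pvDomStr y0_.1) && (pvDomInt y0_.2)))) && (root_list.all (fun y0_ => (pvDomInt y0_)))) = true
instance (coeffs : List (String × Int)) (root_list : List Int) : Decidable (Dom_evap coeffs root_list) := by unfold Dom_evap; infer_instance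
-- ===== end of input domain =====

-- B evaluates exponent-major: it keeps the vector of j-th powers of the roots (updated by elementwise
-- multiplication) and accumulates coeffs[str(j)] times the j-th power sum; same values by commuting the double sum.

-- ===== PORT A =====
-- A's root-major Horner scheme: for each root i, summ = summ*i + coeffs[str(j)] for j = l, l-1, …, 0.
-- coeffs[str(j)] is ported as Dict.getD with default 0; Pre_evap guarantees the key is present, so it is exact there.
def evap (coeffs : List (String × Int)) (root_list : List Int) : Int :=
  let l : Int := PySem.List.len root_list
  let col : Int := PySem.List.len coeffs
  if l ≠ col - 1 then -1
  else
    root_list.foldl (fun sum_r i =>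
      sum_r + (PySem.List.pyRange l (-1) (-1)).foldl
        (fun summ j => summ * i + PySem.Dict.getD (PySem.Dict.mk coeffs) (PySem.Int.toStr j) 0) 0) 0

-- ===== PORT B =====
-- B's exponent-major scheme: state (total, pw); pw starts as [1]*l and is multiplied elementwise
-- by root_list each step; total += coeffs[str(j)] * sum(pw).
def evap_alt (coeffs : List (String × Int)) (root_list : List Int) : Int :=
  let l : Int := PySem.List.len root_list
  if l ≠ PySem.List.len coeffs - 1 then -1
  else
    ((PySem.List.pyRange 0 (l + 1) 1).foldl
      (fun (st : Int × List Int) j =>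
        (st.1 + PySem.Dict.getD (PySem.Dict.mk coeffs) (PySem.Int.toStr j) 0 * st.2.sum,
         st.2.zipWith (· * ·) root_list))
      (0, List.replicate root_list.length 1)).1

-- ===== PRECONDITION & SPEC =====
-- Pre_evap excludes exactly the inputs where Python's coeffs[str(j)] raises KeyError (a key "0"…"l"
-- missing when the length guard passes); everywhere else A returns normally.
def Pre_evap (coeffs : List (String × Int)) (root_list : List Int) : Prop :=
  coeffs.length = root_list.length + 1 →
    ∀ j ∈ List.range (root_list.length + 1),
      (PySem.Dict.mk coeffs).contains (PySem.Int.toStr j)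
instance (coeffs : List (String × Int)) (root_list : List Int) : Decidable (Pre_evap coeffs root_list) := by unfold Pre_evap; infer_instance

def pvWitness_evap : (List (String × Int)) × List Int := ([("0", 2), ("1", 3)], [5])

def Spec_evap (coeffs : List (String × Int)) (root_list : List Int) (out : Int) : Prop := out = evap_alt coeffs root_list
instance (coeffs : List (String × Int)) (root_list : List Int) (out : Int) : Decidable (Spec_evap coeffs root_list out) := by unfold Spec_evap; infer_instance

-- ===== CLAIM (what is proved, stated in full; the proofs are below) =====
def Claim_equal_evap : Prop := ∀ (coeffs : List (String × Int)) (root_list : List Int), Dom_evap coeffs root_list → Pre_evap coeffs root_list → Spec_evap coeffs root_list (evap coeffs root_list)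

-- ===== LEMMAS AND PROOFS =====

-- range(n, -1, -1) is the descending list [n, n-1, ..., 0].
lemma pyRange_down (n : Nat) :
    PySem.List.pyRange (n : Int) (-1) (-1) = (List.range (n + 1)).map (fun (k : Nat) => (n : Int) - k) := by
  simp only [PySem.List.pyRange]
  rw [if_neg (by norm_num : ¬ ((-1 : Int) = 0)), if_neg (by norm_num : ¬ ((0:Int) < -1)),
      if_pos (by omega : (-1 : Int) < (n : Int))]
  have hc : (((n : Int) - -1 + -(-1) - 1) / -(-1)).toNat = n + 1 := by norm_num
  rw [hc]
  refine List.map_congr_left ?_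
  intro k _; ring

-- Horner's accumulator over [n, n-1, ..., 0] equals a*i^(n+1) plus the term-wise sum.
lemma horner_desc (f : Int → Int) (i : Int) :
    ∀ (n : Nat) (a : Int),
      ((List.range (n + 1)).map (fun (k : Nat) => (n : Int) - k)).foldl (fun s j => s * i + f j) a
        = a * i ^ (n + 1) + ((List.range (n + 1)).map (fun (k : Nat) => f (k : Int) * i ^ k)).sum := by
  intro n
  induction n with
  | zero => intro a; simp [List.range_succ]
  | succ n ih =>
    intro a
    have hdesc : (List.range (n + 1 + 1)).map (fun (k : Nat) => (((n : Nat) + 1 : Nat) : Int) - k)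
        = (((n : Nat) : Int) + 1) :: (List.range (n + 1)).map (fun (k : Nat) => (n : Int) - k) := by
      rw [List.range_succ_eq_map]
      simp only [List.map_cons, List.map_map, Function.comp_def, Nat.cast_zero, sub_zero]
      congr 1
      refine List.map_congr_left ?_
      intro k _; push_cast; ring
    have hsum : (List.range (n + 1 + 1)).map (fun (k : Nat) => f (k : Int) * i ^ k)
        = (List.range (n + 1)).map (fun (k : Nat) => f (k : Int) * i ^ k)
          ++ [f (((n : Nat) : Int) + 1) * i ^ (n + 1)] := by
      rw [List.range_succ]; simp
    rw [hdesc, hsum]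
    simp only [List.foldl_cons, List.sum_append, List.sum_cons, List.sum_nil]
    rw [ih]; ring

-- A's inner Horner loop, started at 0, is the term-wise sum Σ_{k≤n} f(k)·i^k.
lemma inner_eq (f : Int → Int) (i : Int) (n : Nat) :
    (PySem.List.pyRange (n : Int) (-1) (-1)).foldl (fun s j => s * i + f j) 0
      = ((List.range (n + 1)).map (fun (k : Nat) => f (k : Int) * i ^ k)).sum := by
  rw [pyRange_down, horner_desc f i n 0]; ring

-- pointwise-sum splitting over a list
lemma sum_map_add' {α : Type} (l : List α) (f g : α → Int) :
    (l.map (fun x => f x + g x)).sum = (l.map f).sum + (l.map g).sum := by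
  induction l with
  | nil => simp
  | cons x xs ih => simp [ih]; ring

-- the double sum commutes
lemma sum_comm_list (xs : List Int) (ks : List Nat) (g : Int → Nat → Int) :
    (xs.map (fun i => (ks.map (fun k => g i k)).sum)).sum
      = (ks.map (fun k => (xs.map (fun i => g i k)).sum)).sum := by
  induction xs with
  | nil => simp
  | cons x xs ih =>
    simp only [List.map_cons, List.sum_cons, ih]
    rw [← sum_map_add']

-- constant factors pull out of a list sum
lemma sum_map_mul_left' {α : Type} (l : List α) (c : Int) (f : α → Int) :
    (l.map (fun x => c * f x)).sum = c * (l.map f).sum := by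
  induction l with
  | nil => simp
  | cons x xs ih => simp [ih]; ring

-- elementwise product of the k-th powers with the roots is the (k+1)-st powers
lemma zip_pow (roots : List Int) (k : Nat) :
    (roots.map (fun i => i ^ k)).zipWith (· * ·) roots = roots.map (fun i => i ^ (k + 1)) := by
  induction roots with
  | nil => simp
  | cons r rs ih => simp [ih, pow_succ, mul_comm]

-- B's fold invariant: starting at exponent k with pw = powers k, processing m steps adds Σ f(k+t)·powsum(k+t).
lemma bfold (f : Int → Int) (roots : List Int) :
    ∀ (m k : Nat) (T : Int),
      (((List.range m).map (fun (t : Nat) => ((k + t : Nat) : Int))).foldl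
        (fun (st : Int × List Int) j => (st.1 + f j * st.2.sum, st.2.zipWith (· * ·) roots))
        (T, roots.map (fun i => i ^ k))).1
      = T + ((List.range m).map (fun (t : Nat) =>
          f ((k + t : Nat) : Int) * (roots.map (fun i => i ^ (k + t))).sum)).sum := by
  intro m
  induction m with
  | zero => intro k T; simp
  | succ m ih =>
    intro k T
    rw [List.range_succ_eq_map]
    simp only [List.map_cons, List.map_map, Function.comp_def, Nat.add_zero, List.foldl_cons,
      List.sum_cons, zip_pow]
    simp only [Nat.add_succ, ← Nat.succ_add]
    rw [ih (k + 1) (T + f ((k : Nat) : Int) * (roots.map fun i => i ^ k).sum)]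
    ring

-- ===== VERDICT (by name: the statement is the Claim_ definition above) =====
theorem evap_spec : Claim_equal_evap := by
  intro coeffs root_list _ _
  unfold Spec_evap evap evap_alt
  simp only [PySem.List.len_eq]
  by_cases hg : (root_list.length : Int) = (coeffs.length : Int) - 1
  · rw [if_neg (fun h => h hg), if_neg (fun h => h hg)]
    set f : Int → Int := fun j => PySem.Dict.getD (PySem.Dict.mk coeffs) (PySem.Int.toStr j) 0 with hf
    set n := root_list.length with hn
    -- A side: sum over roots of term-wise sums
    rw [PySem.List.foldl_add root_list
      (fun i => (PySem.List.pyRange (n : Int) (-1) (-1)).foldl (fun s j => s * i + f j) 0) 0, zero_add]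
    have hA : (root_list.map
        (fun i => (PySem.List.pyRange (n : Int) (-1) (-1)).foldl (fun s j => s * i + f j) 0)).sum
        = ((List.range (n + 1)).map (fun (k : Nat) =>
            (root_list.map (fun i => f (k : Int) * i ^ k)).sum)).sum := by
      rw [List.map_congr_left (fun i _ => inner_eq f i n)]
      exact sum_comm_list root_list (List.range (n + 1)) (fun i k => f (k : Int) * i ^ k)
    rw [hA]
    -- B side: rewrite the python range and the initial pw, then apply the fold invariant
    have hr : PySem.List.pyRange 0 ((n : Int) + 1) 1
        = (List.range (n + 1)).map (fun (t : Nat) => ((0 + t : Nat) : Int)) := by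
      rw [PySem.List.pyRange_one]
      have h2 : (((n : Int) + 1) - 0).toNat = n + 1 := by omega
      rw [h2]
      refine List.map_congr_left ?_
      intro t _; omega
    have hpw : List.replicate root_list.length 1 = root_list.map (fun i => i ^ (0 : Nat)) := by
      simp [List.map_const']
    rw [hr, hpw, bfold f root_list (n + 1) 0 0, zero_add]
    refine congrArg List.sum (List.map_congr_left ?_)
    intro k _
    simp only [Nat.zero_add]
    exact sum_map_mul_left' root_list (f (k : Int)) (fun i => i ^ k)
  · rw [if_pos (by simpa using hg), if_pos (by simpa using hg)]
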